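-- pv_equiv track=rewrite | github.com/tonyp7/brainteasers | is_duo_digit/is_duo_digit.py | is_duo_digit_performance
-- ===== SOURCE A (Python) =====
-- def is_duo_digit_performance(number):
--     #transform the number to its string representation, without the negative sign if any
--     str_n = str(abs(number))
--
--     d1 = ''
--     d2 = ''
--     for c in str_n:
--
--         #first
--         if d1 == '':
--             d1 = c
--         #initialize d2 to another digit found that is not d1
--         elif d2 == '' and d1 != c:
--             d2 = c
--         #check if we have detected a 3rd digit
--         elif c != d1 and c != d2: #not a duo_digit, break as soon as possible
--             return 'n'
--
--     return 'y'
-- ===== SOURCE B (Python) =====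
-- def is_duo_digit_performance(number):
--     # collect every distinct character of the digit string, decide on the count
--     return 'y' if len(set(str(abs(number)))) <= 2 else 'n'
-- ===== Notes on version B (the rewrite author's own statement) =====
-- stated objective: simpler
-- what changed: Replaces the manual two-slot (d1/d2) scanning loop with early exit by building the set of all distinct characters of str(abs(number)) and comparing its cardinality to 2.
import Mathlib
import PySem

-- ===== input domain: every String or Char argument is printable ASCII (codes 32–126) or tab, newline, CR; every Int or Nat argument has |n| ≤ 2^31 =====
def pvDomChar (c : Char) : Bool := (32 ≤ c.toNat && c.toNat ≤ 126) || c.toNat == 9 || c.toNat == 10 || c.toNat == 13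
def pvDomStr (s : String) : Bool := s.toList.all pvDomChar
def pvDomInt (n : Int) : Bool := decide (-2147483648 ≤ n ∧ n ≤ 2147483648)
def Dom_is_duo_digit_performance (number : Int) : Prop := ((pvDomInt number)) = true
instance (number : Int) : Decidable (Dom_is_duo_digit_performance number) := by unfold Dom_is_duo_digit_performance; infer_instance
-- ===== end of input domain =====

-- B replaces A's two-slot (d1/d2) early-exit scan by the set of distinct characters, decided by cardinality (objective: simpler).

-- ===== PORT A =====
-- A's for-loop with mutable d1, d2 and early 'return n'; '' is the empty string, a found digit is the one-character string.
def pvLoopA : List Char → String → String → String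
  | [], _, _ => "y"
  | c :: cs, d1, d2 =>
    if d1 = "" then pvLoopA cs (String.ofList [c]) d2
    else if d2 = "" ∧ d1 ≠ String.ofList [c] then pvLoopA cs d1 (String.ofList [c])
    else if String.ofList [c] ≠ d1 ∧ String.ofList [c] ≠ d2 then "n"
    else pvLoopA cs d1 d2

def is_duo_digit_performance (number : Int) : String :=
  pvLoopA (PySem.Int.toStr |number|).toList "" ""

-- ===== PORT B =====
def is_duo_digit_performance_alt (number : Int) : String :=
  if PySem.Set.len (PySem.Set.ofList (PySem.Int.toStr |number|).toList) ≤ 2 then "y" else "n"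

-- ===== PRECONDITION & SPEC =====
def Spec_is_duo_digit_performance (number : Int) (out : String) : Prop := out = is_duo_digit_performance_alt number
instance (number : Int) (out : String) : Decidable (Spec_is_duo_digit_performance number out) := by unfold Spec_is_duo_digit_performance; infer_instance

-- ===== CLAIM (what is proved, stated in full; the proofs are below) =====
def Claim_equal_is_duo_digit_performance : Prop := ∀ (number : Int), Dom_is_duo_digit_performance number → Spec_is_duo_digit_performance number (is_duo_digit_performance number)

-- ===== LEMMAS AND PROOFS =====

theorem pvOfList_inj (c a : Char) : (String.ofList [c] = String.ofList [a]) ↔ c = a := by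
  constructor
  · intro h; have := congrArg String.toList h; simpa using this
  · rintro rfl; rfl

theorem pvExists_ne (a : Char) : ∃ b : Char, b ≠ a := by
  by_cases h : a = 'A'
  · subst h; exact ⟨'B', by decide⟩
  · exact ⟨'A', fun hh => h hh.symm⟩

-- with both slots filled (by distinct chars), the loop accepts iff every char is one of them
theorem pvLoop2 (l : List Char) (a b : Char) (hab : a ≠ b) :
    pvLoopA l (String.ofList [a]) (String.ofList [b]) = "y" ↔ ∀ c ∈ l, c = a ∨ c = b := by
  induction l with
  | nil => simp [pvLoopA]
  | cons c cs ih =>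
    by_cases hca : c = a
    · subst hca
      simp [pvLoopA, ih]
    · by_cases hcb : c = b
      · subst hcb
        simp [pvLoopA, pvOfList_inj, ih, hca]
      · simp [pvLoopA, pvOfList_inj, hca, hcb, Ne.symm hca]

-- with one slot filled, the loop accepts iff some second char covers the rest
theorem pvLoop1 (l : List Char) (a : Char) :
    pvLoopA l (String.ofList [a]) "" = "y" ↔ ∃ b, b ≠ a ∧ ∀ c ∈ l, c = a ∨ c = b := by
  induction l with
  | nil =>
    simp only [pvLoopA, List.not_mem_nil, false_implies, implies_true, and_true, true_iff]
    exact pvExists_ne a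
  | cons c cs ih =>
    by_cases hca : c = a
    · subst hca
      rw [show pvLoopA (c :: cs) (String.ofList [c]) "" = pvLoopA cs (String.ofList [c]) "" from by
        simp [pvLoopA]]
      rw [ih]
      constructor
      · rintro ⟨b, hb, hall⟩; exact ⟨b, hb, by simpa using hall⟩
      · rintro ⟨b, hb, hall⟩; exact ⟨b, hb, fun x hx => hall x (List.mem_cons_of_mem _ hx)⟩
    · have h1 : String.ofList [a] ≠ String.ofList [c] := by
        simpa [pvOfList_inj] using Ne.symm hca
      rw [show pvLoopA (c :: cs) (String.ofList [a]) "" =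
          pvLoopA cs (String.ofList [a]) (String.ofList [c]) from by
        simp [pvLoopA, h1]]
      rw [pvLoop2 cs a c (Ne.symm hca)]
      constructor
      · intro hall
        exact ⟨c, hca, by simpa using hall⟩
      · rintro ⟨b, hb, hall⟩
        have hcb : c = b := by
          rcases hall c (List.mem_cons_self) with h | h
          · exact absurd h hca
          · exact h
        subst hcb
        intro x hx; exact hall x (List.mem_cons_of_mem _ hx)

-- starting from empty slots, the loop accepts iff two chars cover the whole list
theorem pvLoop0 (l : List Char) :
    pvLoopA l "" "" = "y" ↔ ∃ a b, a ≠ b ∧ ∀ c ∈ l, c = a ∨ c = b := by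
  cases l with
  | nil =>
    simp only [pvLoopA, List.not_mem_nil, false_implies, implies_true, and_true, true_iff]
    exact ⟨'A', 'B', by decide⟩
  | cons c cs =>
    rw [show pvLoopA (c :: cs) "" "" = pvLoopA cs (String.ofList [c]) "" from by simp [pvLoopA]]
    rw [pvLoop1]
    constructor
    · rintro ⟨b, hb, hall⟩
      exact ⟨c, b, Ne.symm hb, by simpa using hall⟩
    · rintro ⟨a, b, hab, hall⟩
      rcases hall c (List.mem_cons_self) with rfl | rfl
      · exact ⟨b, Ne.symm hab, fun x hx => hall x (List.mem_cons_of_mem _ hx)⟩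
      · exact ⟨a, hab, fun x hx => (hall x (List.mem_cons_of_mem _ hx)).symm.imp id id⟩

theorem pvLoopA_cases (l : List Char) (d1 d2 : String) :
    pvLoopA l d1 d2 = "y" ∨ pvLoopA l d1 d2 = "n" := by
  induction l generalizing d1 d2 with
  | nil => left; rfl
  | cons c cs ih =>
    simp only [pvLoopA]
    split_ifs <;> first | exact ih _ _ | (right; rfl)

-- the distinct-character set has at most two elements iff two chars cover the list
theorem pvSetCard (l : List Char) :
    PySem.Set.len (PySem.Set.ofList l) ≤ 2 ↔ ∃ a b, a ≠ b ∧ ∀ c ∈ l, c = a ∨ c = b := by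
  have hnd : (PySem.Set.ofList l).Nodup := PySem.Set.nodup_ofList l
  have hmem : ∀ c, c ∈ PySem.Set.ofList l ↔ c ∈ l := fun c => PySem.Set.mem_ofList l c
  have hlen : PySem.Set.len (PySem.Set.ofList l) = ((PySem.Set.ofList l).length : Int) := rfl
  rw [hlen]
  constructor
  · intro h
    have hle : (PySem.Set.ofList l).length ≤ 2 := by exact_mod_cast h
    match hs : PySem.Set.ofList l, hnd, hle with
    | [], _, _ =>
      refine ⟨'A', 'B', by decide, fun c hc => ?_⟩
      have := (hmem c).2 hc; rw [hs] at this; simp at this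
    | [a], _, _ =>
      obtain ⟨b, hb⟩ := pvExists_ne a
      refine ⟨a, b, Ne.symm hb, fun c hc => ?_⟩
      have := (hmem c).2 hc; rw [hs] at this; simp at this; left; exact this
    | [a, b], hnd', _ =>
      refine ⟨a, b, by simpa using (List.nodup_cons.1 hnd').1, fun c hc => ?_⟩
      have := (hmem c).2 hc; rw [hs] at this; simpa using this
    | a :: b :: x :: t, _, hle' => simp at hle'
  · rintro ⟨a, b, hab, hall⟩
    have hsub : (PySem.Set.ofList l).toFinset ⊆ ({a, b} : Finset Char) := by
      intro x hx
      have : x ∈ l := (hmem x).1 (List.mem_toFinset.1 hx)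
      rcases hall x this with rfl | rfl <;> simp
    have : (PySem.Set.ofList l).length ≤ 2 := by
      calc (PySem.Set.ofList l).length = (PySem.Set.ofList l).toFinset.card :=
            (List.toFinset_card_of_nodup hnd).symm
        _ ≤ ({a, b} : Finset Char).card := Finset.card_le_card hsub
        _ ≤ 2 := Finset.card_insert_le a {b} |>.trans (by simp)
    exact_mod_cast this

-- ===== VERDICT (by name: the statement is the Claim_ definition above) =====
theorem is_duo_digit_performance_spec : Claim_equal_is_duo_digit_performance := by
  intro number _
  unfold Spec_is_duo_digit_performance is_duo_digit_performance is_duo_digit_performance_alt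
  set l := (PySem.Int.toStr |number|).toList with hl
  by_cases h : ∃ a b, a ≠ b ∧ ∀ c ∈ l, c = a ∨ c = b
  · rw [if_pos ((pvSetCard l).2 h)]
    exact (pvLoop0 l).2 h
  · rw [if_neg (fun hc => h ((pvSetCard l).1 hc))]
    rcases pvLoopA_cases l "" "" with hy | hn
    · exact absurd ((pvLoop0 l).1 hy) h
    · exact hn
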